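-- pv_equiv track=rewrite | github.com/sidequery/sidemantic | sidemantic/adapters/holistics.py | _split_aql_pipeline
-- ===== SOURCE A (Python) =====
-- def _split_aql_pipeline(expr: str) -> list[str]:
--     segments: list[str] = []
--     buf: list[str] = []
--     depth = 0
--     quote = None
--     escape = False
--
--     for ch in expr:
--         if escape:
--             buf.append(ch)
--             escape = False
--             continue
--         if ch == "\\":
--             buf.append(ch)
--             escape = True
--             continue
--         if quote:
--             buf.append(ch)
--             if ch == quote:
--                 quote = None
--             continue
--         if ch in {"'", '"', "`"}:
--             quote = ch
--             buf.append(ch)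
--             continue
--         if ch == "(":
--             depth += 1
--             buf.append(ch)
--             continue
--         if ch == ")":
--             depth = max(0, depth - 1)
--             buf.append(ch)
--             continue
--         if ch == "|" and depth == 0:
--             segment = "".join(buf).strip()
--             if segment:
--                 segments.append(segment)
--             buf = []
--             continue
--         buf.append(ch)
--
--     tail = "".join(buf).strip()
--     if tail:
--         segments.append(tail)
--     return segments
-- ===== SOURCE B (Python) =====
-- def _split_aql_pipeline(expr: str) -> list[str]:
--     # Pass 1: find the indices of top-level pipes with a depth/quote/escape scan.
--     cuts: list[int] = []
--     depth = 0
--     quote = None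
--     escape = False
--     for i, ch in enumerate(expr):
--         if escape:
--             escape = False
--         elif ch == "\\":
--             escape = True
--         elif quote:
--             if ch == quote:
--                 quote = None
--         elif ch in "'\"`":
--             quote = ch
--         elif ch == "(":
--             depth += 1
--         elif ch == ")":
--             depth = max(0, depth - 1)
--         elif ch == "|" and depth == 0:
--             cuts.append(i)
--     # Pass 2: slice between consecutive cut points, strip, keep non-empty.
--     out: list[str] = []
--     prev = 0
--     for cut in cuts + [len(expr)]:
--         seg = expr[prev:cut].strip()
--         if seg:
--             out.append(seg)
--         prev = cut + 1
--     return out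
-- ===== Notes on version B (the rewrite author's own statement) =====
-- stated objective: alternative
-- what changed: B separates boundary-finding from segment-extraction: one pass records the indices of top-level pipes (no character buffer at all), then a second pass slices the original string between consecutive cut points, strips and filters; A interleaves everything through a growing character buffer.
import Mathlib
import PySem

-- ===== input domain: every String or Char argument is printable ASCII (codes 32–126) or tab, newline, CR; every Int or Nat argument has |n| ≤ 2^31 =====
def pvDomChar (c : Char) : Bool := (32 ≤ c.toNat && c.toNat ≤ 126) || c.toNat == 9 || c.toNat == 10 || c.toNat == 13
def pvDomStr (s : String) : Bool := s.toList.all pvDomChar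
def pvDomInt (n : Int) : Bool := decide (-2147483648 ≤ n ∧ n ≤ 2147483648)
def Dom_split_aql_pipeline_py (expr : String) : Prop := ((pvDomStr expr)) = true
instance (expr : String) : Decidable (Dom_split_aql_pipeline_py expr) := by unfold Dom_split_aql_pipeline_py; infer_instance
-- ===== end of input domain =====

-- B separates boundary-finding from segment-extraction (cut indices + slicing) instead of A's
-- interleaved character buffer; same cost, different decomposition ("alternative").

-- ===== PORT A =====
-- A's single loop: state = (segments so far, character buffer, depth, quote, escape).
def pvALoop : List Char → List (List Char) → List Char → Int → Option Char → Bool → List (List Char)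
  | [], segs, buf, _, _, _ =>
      -- tail = "".join(buf).strip(); if tail: segments.append(tail)
      let tail := PySem.Chars.strip buf
      if tail = [] then segs else segs ++ [tail]
  | ch :: rest, segs, buf, depth, quote, escape =>
      if escape then pvALoop rest segs (buf ++ [ch]) depth quote false
      else if ch = '\\' then pvALoop rest segs (buf ++ [ch]) depth quote true
      else if quote.isSome then
        pvALoop rest segs (buf ++ [ch]) depth (if quote = some ch then none else quote) false
      else if ch = '\'' ∨ ch = '"' ∨ ch = '`' then
        pvALoop rest segs (buf ++ [ch]) depth (some ch) false
      else if ch = '(' then pvALoop rest segs (buf ++ [ch]) (depth + 1) quote false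
      else if ch = ')' then pvALoop rest segs (buf ++ [ch]) (max 0 (depth - 1)) quote false
      else if ch = '|' ∧ depth = 0 then
        let seg := PySem.Chars.strip buf
        pvALoop rest (if seg = [] then segs else segs ++ [seg]) [] depth quote false
      else pvALoop rest segs (buf ++ [ch]) depth quote false

def split_aql_pipeline_py (expr : String) : List String :=
  (pvALoop expr.toList [] [] 0 none false).map String.ofList

-- ===== PORT B =====
-- Pass 1: the same depth/quote/escape scan, but it only records indices of top-level '|'.
def pvBScan : List Char → Nat → Int → Option Char → Bool → List Nat
  | [], _, _, _, _ => []
  | ch :: rest, i, depth, quote, escape =>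
      if escape then pvBScan rest (i + 1) depth quote false
      else if ch = '\\' then pvBScan rest (i + 1) depth quote true
      else if quote.isSome then
        pvBScan rest (i + 1) depth (if quote = some ch then none else quote) false
      else if ch = '\'' ∨ ch = '"' ∨ ch = '`' then
        pvBScan rest (i + 1) depth (some ch) false
      else if ch = '(' then pvBScan rest (i + 1) (depth + 1) quote false
      else if ch = ')' then pvBScan rest (i + 1) (max 0 (depth - 1)) quote false
      else if ch = '|' ∧ depth = 0 then i :: pvBScan rest (i + 1) depth quote false
      else pvBScan rest (i + 1) depth quote false

-- Pass 2: for cut in cuts + [len(expr)]: seg = expr[prev:cut].strip(); if seg: out.append(seg); prev = cut+1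
def pvBEmit (full : List Char) : List Nat → Nat → List (List Char) → List (List Char)
  | [], _, out => out
  | c :: cs, prev, out =>
      let seg := PySem.Chars.strip (PySem.List.slice full (some (prev : Int)) (some (c : Int)))
      pvBEmit full cs (c + 1) (if seg = [] then out else out ++ [seg])

def split_aql_pipeline_py_alt (expr : String) : List String :=
  (pvBEmit expr.toList (pvBScan expr.toList 0 0 none false ++ [expr.toList.length]) 0 []).map
    String.ofList

-- ===== PRECONDITION & SPEC =====
def Spec_split_aql_pipeline_py (expr : String) (out : List String) : Prop := out = split_aql_pipeline_py_alt expr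
instance (expr : String) (out : List String) : Decidable (Spec_split_aql_pipeline_py expr out) := by unfold Spec_split_aql_pipeline_py; infer_instance

-- ===== CLAIM (what is proved, stated in full; the proofs are below) =====
def Claim_equal_split_aql_pipeline_py : Prop := ∀ (expr : String), Dom_split_aql_pipeline_py expr → Spec_split_aql_pipeline_py expr (split_aql_pipeline_py expr)

-- ===== LEMMAS AND PROOFS =====

-- expr[prev:d] for a prefix `done` of length d (prev ≤ d) is exactly A's buffer `done.drop prev`.
lemma pv_slice_prefix (done tail : List Char) (prev : Nat) (h : prev ≤ done.length) :
    PySem.List.slice (done ++ tail) (some (prev : Int)) (some (done.length : Int))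
      = done.drop prev := by
  rw [PySem.List.slice_natCast, List.drop_append_of_le_length h]
  have hlen : (done.drop prev).length = done.length - prev := List.length_drop ..
  calc ((done.drop prev ++ tail).take (done.length - prev))
      = (done.drop prev ++ tail).take (done.drop prev).length := by rw [hlen]
    _ = done.drop prev := List.take_left

-- specialisation of pv_slice_prefix to the whole string (the final tail slice)
lemma pv_slice_all (done : List Char) (prev : Nat) (h : prev ≤ done.length) :
    PySem.List.slice done (some (prev : Int)) (some (done.length : Int)) = done.drop prev := by
  simpa using pv_slice_prefix done [] prev h

-- Main invariant: A's loop from any aligned state equals B's emit over B's scan from that state.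
lemma pv_main (rest : List Char) :
    ∀ (done : List Char) (segs : List (List Char)) (depth : Int) (quote : Option Char)
      (escape : Bool) (prev : Nat), prev ≤ done.length →
      pvALoop rest segs (done.drop prev) depth quote escape
        = pvBEmit (done ++ rest)
            (pvBScan rest done.length depth quote escape ++ [(done ++ rest).length]) prev segs := by
  induction rest with
  | nil =>
      intro done segs depth quote escape prev h
      simp only [pvALoop, pvBScan, pvBEmit, List.nil_append, List.append_nil]
      rw [pv_slice_all done prev h]
  | cons ch rs ih =>
      intro done segs depth quote escape prev h
      have hfull : done ++ ch :: rs = (done ++ [ch]) ++ rs := by simp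
      have hlen : (done ++ [ch]).length = done.length + 1 := by simp
      have hbuf : done.drop prev ++ [ch] = (done ++ [ch]).drop prev := by
        rw [List.drop_append_of_le_length h]
      have hle : prev ≤ (done ++ [ch]).length := by simp; omega
      simp only [pvALoop, pvBScan]
      split
      · rw [hbuf, hfull, ← hlen]; exact ih _ _ _ _ _ _ hle
      · split
        · rw [hbuf, hfull, ← hlen]; exact ih _ _ _ _ _ _ hle
        · split
          · rw [hbuf, hfull, ← hlen]; exact ih _ _ _ _ _ _ hle
          · split
            · rw [hbuf, hfull, ← hlen]; exact ih _ _ _ _ _ _ hle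
            · split
              · rw [hbuf, hfull, ← hlen]; exact ih _ _ _ _ _ _ hle
              · split
                · rw [hbuf, hfull, ← hlen]; exact ih _ _ _ _ _ _ hle
                · split
                  · -- top-level pipe: A flushes the buffer, B records the cut index
                    simp only [List.cons_append, pvBEmit]
                    rw [pv_slice_prefix done (ch :: rs) prev h]
                    have hd : (done ++ [ch]).drop (done.length + 1) = [] :=
                      List.drop_of_length_le (by simp)
                    have hE := ih (done ++ [ch])
                      (if PySem.Chars.strip (done.drop prev) = [] then segs
                       else segs ++ [PySem.Chars.strip (done.drop prev)])
                      depth quote false (done.length + 1)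
                      (by simp only [List.length_append, List.length_cons, List.length_nil]; omega)
                    rw [hd, hlen] at hE
                    rw [hfull]
                    exact hE
                  · rw [hbuf, hfull, ← hlen]; exact ih _ _ _ _ _ _ hle

-- ===== VERDICT (by name: the statement is the Claim_ definition above) =====
theorem split_aql_pipeline_py_spec : Claim_equal_split_aql_pipeline_py := by
  intro expr _
  show _ = _
  unfold split_aql_pipeline_py split_aql_pipeline_py_alt
  have := pv_main expr.toList [] [] 0 none false 0 (by simp)
  simp only [List.drop_nil, List.nil_append, List.length_nil] at this
  rw [this]
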